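-- pv_equiv track=rewrite | github.com/jerrycui2007/CCC-Senior-Solutions | 1996/S5 Maximum Distance.py | find_maximum_distance
-- ===== SOURCE A (Python) =====
-- def find_maximum_distance(length: int, x: list[int], y: list[int]) -> int:
--     """Find the maximum distance between matching elements in arrays x and y.
--
--     The distance is calculated as j-i where:
--     - i is the index of a number in array x
--     - j is the index of the same number in array y
--     - only the leftmost occurrence in x and rightmost occurrence in y are considered
--
--     Args:
--         length: The length of both arrays
--         x: First array of integers
--         y: Second array of integers
--
--     Returns:
--         Maximum distance found between any matching elements
--     """
--     # Store first occurrence of each number in x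
--     first_x = {}
--     for i, num in enumerate(x):
--         if num not in first_x:
--             first_x[num] = i
--
--     # Store last occurrence of each number in y
--     last_y = {}
--     for i in range(length - 1, -1, -1):
--         if y[i] not in last_y:
--             last_y[y[i]] = i
--
--     # Calculate maximum distance
--     max_distance = 0
--     for num in first_x:
--         if num in last_y:
--             max_distance = max(max_distance, last_y[num] - first_x[num])
--
--     return max_distance
-- ===== SOURCE B (Python) =====
-- def find_maximum_distance(length: int, x: list[int], y: list[int]) -> int:
--     """Direct single forward scan: for every position j in y whose value occurs
--     in x, the candidate distance is j - x.index(v).  No last-occurrence table is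
--     needed: j - x.index(v) is increasing in j, so the rightmost occurrence of v
--     dominates automatically and the running maximum equals A's answer."""
--     best = 0
--     for j in range(length):
--         v = y[j]
--         if v in x:
--             best = max(best, j - x.index(v))
--     return best
-- ===== Notes on version B (the rewrite author's own statement) =====
-- stated objective: simpler
-- what changed: B drops both occurrence dictionaries and the key loop: one forward scan over y takes j - x.index(y[j]) for every position whose value occurs in x; the last-occurrence table is unnecessary because j - x.index(v) grows with j, so the rightmost occurrence dominates automatically.
import Mathlib
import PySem

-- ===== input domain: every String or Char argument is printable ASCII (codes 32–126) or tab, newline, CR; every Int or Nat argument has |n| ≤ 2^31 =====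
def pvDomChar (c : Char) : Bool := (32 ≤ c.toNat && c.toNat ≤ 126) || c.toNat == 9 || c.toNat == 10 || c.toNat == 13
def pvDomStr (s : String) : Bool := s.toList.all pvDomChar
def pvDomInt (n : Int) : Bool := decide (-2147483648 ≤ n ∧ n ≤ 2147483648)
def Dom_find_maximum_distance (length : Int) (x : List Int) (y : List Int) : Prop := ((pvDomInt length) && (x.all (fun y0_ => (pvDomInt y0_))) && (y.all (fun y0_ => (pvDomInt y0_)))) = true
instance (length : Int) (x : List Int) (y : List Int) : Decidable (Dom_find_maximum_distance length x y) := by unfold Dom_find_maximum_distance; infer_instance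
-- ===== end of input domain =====

-- B replaces A's two occurrence dictionaries and key loop by one direct forward scan
-- over y using list.index (objective: simpler; same result, B is not faster).

-- ===== PORT A =====
-- y[i] is ported as pyGetD y i 0; under Pre_ every index i of the loop is in range,
-- so the default never fires.
def find_maximum_distance (length : Int) (x : List Int) (y : List Int) : Int :=
  let first_x : PySem.Dict Int Int :=
    (PySem.List.enumerate x 0).foldl
      (fun d p => if d.contains p.2 then d else d.insert p.2 p.1) PySem.Dict.empty
  let last_y : PySem.Dict Int Int :=
    (PySem.List.pyRange (length - 1) (-1) (-1)).foldl
      (fun d i => if d.contains (PySem.List.pyGetD y i 0) then d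
                  else d.insert (PySem.List.pyGetD y i 0) i) PySem.Dict.empty
  first_x.keys.foldl
    (fun md num => if last_y.contains num then
                     max md (last_y.getD num 0 - first_x.getD num 0)
                   else md) 0

-- ===== PORT B =====
def find_maximum_distance_alt (length : Int) (x : List Int) (y : List Int) : Int :=
  (PySem.List.pyRange 0 length 1).foldl
    (fun best j =>
      let v := PySem.List.pyGetD y j 0
      if x.contains v then max best (j - (((PySem.List.index? x v).getD 0 : Nat) : Int))
      else best) 0

-- ===== PRECONDITION & SPEC =====
-- A raises IndexError (y[i]) exactly when length > len(y); B raises there too.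
def Pre_find_maximum_distance (length : Int) (_x : List Int) (y : List Int) : Prop :=
  length ≤ (y.length : Int)
instance (length : Int) (x : List Int) (y : List Int) : Decidable (Pre_find_maximum_distance length x y) := by unfold Pre_find_maximum_distance; infer_instance
def pvWitness_find_maximum_distance : Int × List Int × List Int := (2, ([5, 7], [7, 5]))
def Spec_find_maximum_distance (length : Int) (x : List Int) (y : List Int) (out : Int) : Prop := out = find_maximum_distance_alt length x y
instance (length : Int) (x : List Int) (y : List Int) (out : Int) : Decidable (Spec_find_maximum_distance length x y out) := by unfold Spec_find_maximum_distance; infer_instance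

-- ===== CLAIM (what is proved, stated in full; the proofs are below) =====
def Claim_equal_find_maximum_distance : Prop := ∀ (length : Int) (x : List Int) (y : List Int), Dom_find_maximum_distance length x y → Pre_find_maximum_distance length x y → Spec_find_maximum_distance length x y (find_maximum_distance length x y)

-- ===== LEMMAS AND PROOFS =====

-- generic 'insert key only if absent' dict-building fold (first_x and last_y are both instances)
def buildD {α : Type} (f : α → Int) (h : α → Int) (l : List α) (d : PySem.Dict Int Int) :
    PySem.Dict Int Int :=
  l.foldl (fun d a => if d.contains (f a) then d else d.insert (f a) (h a)) d

theorem buildD_get?_frozen {α : Type} (f h : α → Int) (l : List α) (d : PySem.Dict Int Int)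
    (v : Int) (hc : d.contains v = true) : (buildD f h l d).get? v = d.get? v := by
  induction l generalizing d with
  | nil => rfl
  | cons a t ih =>
    simp only [buildD, List.foldl_cons]
    by_cases hca : d.contains (f a) = true
    · simpa [hca] using ih d hc
    · have hne : f a ≠ v := fun he => hca (he ▸ hc)
      have hc' : (d.insert (f a) (h a)).contains v = true := by
        simp [PySem.Dict.contains_insert, hc]
      rw [if_neg hca]
      exact (ih (d.insert (f a) (h a)) hc').trans
        (PySem.Dict.get?_insert_of_ne d (h a) hne.symm)

-- the dict built by 'insert if absent' answers with the FIRST matching element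
theorem buildD_get? {α : Type} (f h : α → Int) (l : List α) (d : PySem.Dict Int Int)
    (v : Int) (hc : d.contains v = false) :
    (buildD f h l d).get? v = (l.find? (fun a => decide (f a = v))).map h := by
  induction l generalizing d with
  | nil =>
    simp only [buildD, List.foldl_nil, List.find?_nil, Option.map_none]
    rw [PySem.Dict.get?_eq_none_iff_contains]; exact hc
  | cons a t ih =>
    simp only [buildD, List.foldl_cons]
    by_cases he : f a = v
    · subst he
      rw [List.find?_cons_of_pos (by simp)]
      have hcv : (d.insert (f a) (h a)).contains (f a) = true := by
        simp
      rw [if_neg (by simp [hc])]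
      have hfz := buildD_get?_frozen f h t (d.insert (f a) (h a)) (f a) hcv
      rw [buildD] at hfz
      rw [hfz, PySem.Dict.get?_insert_self]
      rfl
    · rw [List.find?_cons_of_neg (by simp [he])]
      by_cases hca : d.contains (f a) = true
      · rw [if_pos hca]; exact ih d hc
      · rw [if_neg hca]
        have hc' : (d.insert (f a) (h a)).contains v = false := by
          simp only [PySem.Dict.contains_insert, hc, Bool.or_false, beq_eq_false_iff_ne]
          exact fun hh => he hh.symm
        exact ih _ hc'

-- first_x's answer is list.index, shifted by the enumerate start
theorem enum_find?_eq_index? (x : List Int) (k : Int) (v : Int) :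
    ((PySem.List.enumerate x k).find? (fun p => decide (p.2 = v))).map Prod.fst
      = (PySem.List.index? x v).map (fun i => (i : Int) + k) := by
  induction x generalizing k with
  | nil => simp [PySem.List.enumerate_nil]
  | cons a t ih =>
    rw [PySem.List.enumerate_cons]
    by_cases he : a = v
    · subst he
      rw [List.find?_cons_of_pos (by simp), PySem.List.index?_cons_self]
      simp
    · rw [List.find?_cons_of_neg (by simp [he]), PySem.List.index?_cons_of_ne t he, ih (k + 1)]
      cases PySem.List.index? t v with
      | none => rfl
      | some i =>
        simp
        omega

-- find? on a strictly descending list: the hit is the maximal element satisfying p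
theorem find?_desc_max (p : Int → Bool) (js : List Int) (hs : js.Pairwise (· > ·))
    (j : Int) (h : js.find? p = some j) :
    j ∈ js ∧ p j = true := by
  induction js with
  | nil => simp at h
  | cons i t ih =>
    by_cases hp : p i = true
    · rw [List.find?_cons_of_pos hp] at h
      obtain rfl : i = j := by injection h
      exact ⟨List.mem_cons_self .., hp⟩
    · rw [List.find?_cons_of_neg hp] at h
      obtain ⟨hm, hpj⟩ := ih hs.of_cons h
      exact ⟨List.mem_cons_of_mem _ hm, hpj⟩

-- find? on a strictly descending list hits an element ≥ any element satisfying p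
theorem find?_desc_ge (p : Int → Bool) (js : List Int) (hs : js.Pairwise (· > ·))
    (j : Int) (hm : j ∈ js) (hp : p j = true) :
    ∃ j0, js.find? p = some j0 ∧ j ≤ j0 ∧ p j0 = true := by
  induction js with
  | nil => simp at hm
  | cons i t ih =>
    by_cases hpi : p i = true
    · refine ⟨i, List.find?_cons_of_pos hpi, ?_, hpi⟩
      rcases List.mem_cons.mp hm with rfl | hm
      · omega
      · exact le_of_lt (List.rel_of_pairwise_cons hs hm)
    · rw [List.find?_cons_of_neg hpi]
      rcases List.mem_cons.mp hm with rfl | hm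
      · exact absurd hp (by simpa using hpi)
      · exact ih hs.of_cons hm

-- ---- A's comparison fold ----

def foldA (dL d : PySem.Dict Int Int) (l : List Int) (b : Int) : Int :=
  l.foldl (fun md num => if dL.contains num then max md (dL.getD num 0 - d.getD num 0) else md) b

theorem foldA_ge_init (dL d : PySem.Dict Int Int) (l : List Int) (b : Int) :
    b ≤ foldA dL d l b := by
  induction l generalizing b with
  | nil => simp [foldA]
  | cons v t ih =>
    simp only [foldA, List.foldl_cons]
    by_cases h : dL.contains v = true
    · rw [if_pos h]
      exact le_trans (le_max_left _ _) (ih _)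
    · rw [if_neg h]
      exact ih b

theorem foldA_ge (dL d : PySem.Dict Int Int) (l : List Int) (b v : Int)
    (hm : v ∈ l) (hc : dL.contains v = true) :
    dL.getD v 0 - d.getD v 0 ≤ foldA dL d l b := by
  induction l generalizing b with
  | nil => simp at hm
  | cons w t ih =>
    simp only [foldA, List.foldl_cons]
    rcases List.mem_cons.mp hm with rfl | hm
    · rw [if_pos hc]
      exact le_trans (le_max_right _ _) (foldA_ge_init dL d t _)
    · by_cases h : dL.contains w = true
      · rw [if_pos h]; exact ih _ hm
      · rw [if_neg h]; exact ih _ hm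

theorem foldA_mem (dL d : PySem.Dict Int Int) (l : List Int) (b : Int) :
    foldA dL d l b = b ∨
      ∃ v ∈ l, dL.contains v = true ∧ foldA dL d l b = dL.getD v 0 - d.getD v 0 := by
  induction l generalizing b with
  | nil => left; rfl
  | cons w t ih =>
    simp only [foldA, List.foldl_cons]
    by_cases h : dL.contains w = true
    · rw [if_pos h]
      rcases ih (max b (dL.getD w 0 - d.getD w 0)) with hb | ⟨v, hv, hcv, he⟩
      · rcases max_choice b (dL.getD w 0 - d.getD w 0) with hm | hm
        · left; rw [foldA] at hb; rw [hb, hm]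
        · right
          exact ⟨w, List.mem_cons_self .., h, by rw [foldA] at hb; rw [hb, hm]⟩
      · right; exact ⟨v, List.mem_cons_of_mem _ hv, hcv, he⟩
    · rw [if_neg h]
      rcases ih b with hb | ⟨v, hv, hcv, he⟩
      · left; exact hb
      · right; exact ⟨v, List.mem_cons_of_mem _ hv, hcv, he⟩

-- ---- B's scan fold ----

def foldB (g : Int → Int) (x : List Int) (js : List Int) (b : Int) : Int :=
  js.foldl
    (fun best j =>
      if x.contains (g j) then max best (j - (((PySem.List.index? x (g j)).getD 0 : Nat) : Int))
      else best) b

theorem foldB_ge_init (g : Int → Int) (x js : List Int) (b : Int) : b ≤ foldB g x js b := by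
  induction js generalizing b with
  | nil => simp [foldB]
  | cons i t ih =>
    simp only [foldB, List.foldl_cons]
    by_cases h : x.contains (g i) = true
    · rw [if_pos h]
      exact le_trans (le_max_left _ _) (ih _)
    · rw [if_neg h]
      exact ih b

theorem foldB_ge (g : Int → Int) (x js : List Int) (b j : Int)
    (hm : j ∈ js) (hc : x.contains (g j) = true) :
    j - (((PySem.List.index? x (g j)).getD 0 : Nat) : Int) ≤ foldB g x js b := by
  induction js generalizing b with
  | nil => simp at hm
  | cons i t ih =>
    simp only [foldB, List.foldl_cons]
    rcases List.mem_cons.mp hm with rfl | hm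
    · rw [if_pos hc]
      exact le_trans (le_max_right _ _) (foldB_ge_init g x t _)
    · by_cases h : x.contains (g i) = true
      · rw [if_pos h]; exact ih _ hm
      · rw [if_neg h]; exact ih _ hm

theorem foldB_mem (g : Int → Int) (x js : List Int) (b : Int) :
    foldB g x js b = b ∨
      ∃ j ∈ js, x.contains (g j) = true ∧
        foldB g x js b = j - (((PySem.List.index? x (g j)).getD 0 : Nat) : Int) := by
  induction js generalizing b with
  | nil => left; rfl
  | cons i t ih =>
    simp only [foldB, List.foldl_cons]
    by_cases h : x.contains (g i) = true
    · rw [if_pos h]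
      rcases ih (max b (i - (((PySem.List.index? x (g i)).getD 0 : Nat) : Int))) with hb | ⟨j, hj, hcj, he⟩
      · rcases max_choice b (i - (((PySem.List.index? x (g i)).getD 0 : Nat) : Int)) with hm | hm
        · left; rw [foldB] at hb; rw [hb, hm]
        · right
          exact ⟨i, List.mem_cons_self .., h, by rw [foldB] at hb; rw [hb, hm]⟩
      · right; exact ⟨j, List.mem_cons_of_mem _ hj, hcj, he⟩
    · rw [if_neg h]
      rcases ih b with hb | ⟨j, hj, hcj, he⟩
      · left; exact hb
      · right; exact ⟨j, List.mem_cons_of_mem _ hj, hcj, he⟩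

-- descending range is pairwise >
theorem pyRange_neg_one_pairwise_gt (a b : Int) :
    (PySem.List.pyRange a b (-1)).Pairwise (· > ·) := by
  rw [PySem.List.pyRange_neg_one_eq_reverse, List.pairwise_reverse]
  exact PySem.List.pairwise_lt_pyRange_one _ _

-- ---- facts about A's first_x dict (instance of buildD) ----

theorem firstX_get? (x : List Int) (v : Int) :
    (buildD Prod.snd Prod.fst (PySem.List.enumerate x 0) PySem.Dict.empty).get? v
      = (PySem.List.index? x v).map (fun i => (i : Int)) := by
  rw [buildD_get? _ _ _ _ v (PySem.Dict.contains_empty v)]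
  have := enum_find?_eq_index? x 0 v
  simpa using this

theorem firstX_contains (x : List Int) (v : Int) :
    (buildD Prod.snd Prod.fst (PySem.List.enumerate x 0) PySem.Dict.empty).contains v
      = x.contains v := by
  rw [PySem.Dict.contains_eq_isSome_get?, firstX_get?]
  rcases h : PySem.List.index? x v with _ | i
  · have : v ∉ x := (PySem.List.index?_eq_none_iff x v).mp h
    simp [List.contains_eq_mem, this]
  · have : v ∈ x := (PySem.List.index?_isSome_iff x v).mp (by rw [h]; rfl)
    simp [List.contains_eq_mem, this]

theorem firstX_getD (x : List Int) (v : Int) (hv : v ∈ x) :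
    (buildD Prod.snd Prod.fst (PySem.List.enumerate x 0) PySem.Dict.empty).getD v 0
      = (((PySem.List.index? x v).getD 0 : Nat) : Int) := by
  rw [PySem.Dict.getD_eq_get?_getD, firstX_get?]
  obtain ⟨i, hi⟩ := Option.isSome_iff_exists.mp ((PySem.List.index?_isSome_iff x v).mpr hv)
  rw [hi]; rfl

-- ---- the heart: A's three-loop result equals B's single forward scan ----

theorem main_eq (g : Int → Int) (x : List Int) (length : Int) :
    foldA (buildD g id (PySem.List.pyRange (length - 1) (-1) (-1)) PySem.Dict.empty)
          (buildD Prod.snd Prod.fst (PySem.List.enumerate x 0) PySem.Dict.empty)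
          (buildD Prod.snd Prod.fst (PySem.List.enumerate x 0) PySem.Dict.empty).keys 0
      = foldB g x (PySem.List.pyRange 0 length 1) 0 := by
  set jsA := PySem.List.pyRange (length - 1) (-1) (-1) with hjsA
  set jsB := PySem.List.pyRange 0 length 1 with hjsB
  set L := buildD g id jsA PySem.Dict.empty with hL
  set F := buildD Prod.snd Prod.fst (PySem.List.enumerate x 0) PySem.Dict.empty with hF
  have hAB : jsA = jsB.reverse := by
    rw [hjsA, hjsB, PySem.List.pyRange_neg_one_eq_reverse]
    norm_num
  have hmemAB : ∀ j, j ∈ jsA ↔ j ∈ jsB := by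
    intro j; rw [hAB, List.mem_reverse]
  have hdesc : jsA.Pairwise (· > ·) := pyRange_neg_one_pairwise_gt _ _
  have hget : ∀ v, L.get? v = (jsA.find? (fun j => decide (g j = v))).map id := fun v =>
    buildD_get? g id jsA PySem.Dict.empty v (PySem.Dict.contains_empty v)
  apply le_antisymm
  · rcases foldA_mem L F F.keys 0 with h0 | ⟨v, hv, hcv, he⟩
    · rw [h0]; exact foldB_ge_init g x jsB 0
    · rw [he]
      rw [PySem.Dict.contains_eq_isSome_get?, hget v] at hcv
      simp only [Option.map_id_fun, id_eq] at hcv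
      obtain ⟨j, hj⟩ := Option.isSome_iff_exists.mp hcv
      obtain ⟨hjm, hpj⟩ := find?_desc_max _ jsA hdesc j hj
      have hgj : g j = v := by simpa using hpj
      have hLv : L.getD v 0 = j := by
        rw [PySem.Dict.getD_eq_get?_getD, hget v, hj]; rfl
      have hvx : v ∈ x := by
        have := (PySem.Dict.contains_iff_mem_keys F v).mpr hv
        rw [hF, firstX_contains] at this
        simpa [List.contains_eq_mem] using this
      have hFv : F.getD v 0 = (((PySem.List.index? x v).getD 0 : Nat) : Int) :=
        firstX_getD x v hvx
      have hge := foldB_ge g x jsB 0 j ((hmemAB j).mp hjm)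
        (by rw [hgj]; simpa [List.contains_eq_mem] using hvx)
      rw [hgj] at hge
      rw [hLv, hFv]
      exact hge
  · rcases foldB_mem g x jsB 0 with h0 | ⟨j, hj, hcj, he⟩
    · rw [h0]; exact foldA_ge_init L F F.keys 0
    · rw [he]
      set v := g j with hv
      obtain ⟨j0, hfind, hle, hp0⟩ := find?_desc_ge (fun j' => decide (g j' = v)) jsA hdesc
        j ((hmemAB j).mpr hj) (by simp [hv])
      have hLc : L.contains v = true := by
        rw [PySem.Dict.contains_eq_isSome_get?, hget v, hfind]; rfl
      have hLv : L.getD v 0 = j0 := by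
        rw [PySem.Dict.getD_eq_get?_getD, hget v, hfind]; rfl
      have hvx : v ∈ x := by simpa [List.contains_eq_mem] using hcj
      have hkm : v ∈ F.keys := by
        rw [← PySem.Dict.contains_iff_mem_keys, hF, firstX_contains]
        simpa [List.contains_eq_mem] using hvx
      have hFv : F.getD v 0 = (((PySem.List.index? x v).getD 0 : Nat) : Int) :=
        firstX_getD x v hvx
      have hge := foldA_ge L F F.keys 0 v hkm hLc
      rw [hLv, hFv] at hge
      omega

-- ===== VERDICT (by name: the statement is the Claim_ definition above) =====
theorem find_maximum_distance_spec : Claim_equal_find_maximum_distance := by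
  intro length x y _ _
  unfold Spec_find_maximum_distance find_maximum_distance find_maximum_distance_alt
  exact main_eq (fun i => PySem.List.pyGetD y i 0) x length
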